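-- pv_equiv track=rewrite | github.com/tzyl/aoc21 | day23/solution23.py | get_possible_enter_long_room_target
-- ===== SOURCE A (Python) =====
-- from typing import Generator, Generic, Literal, TypeGuard, TypeVar
--
-- Amphipod = Literal["A", "B", "C", "D"]
--
-- LongRoom = tuple[Amphipod | None, Amphipod | None, Amphipod | None, Amphipod | None]
--
-- def get_possible_enter_long_room_target(
--     amphipod: Amphipod, room: LongRoom
-- ) -> tuple[int, LongRoom] | None:
--     steps_to_enter_room: int
--     next_room: LongRoom
--
--     a0, a1, a2, a3 = room[0], room[1], room[2], room[3]
--     if a0 is None and a1 is None and a2 is None and a3 is None: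
--         steps_to_enter_room = 4
--         next_room = (amphipod, None, None, None)
--     elif a0 is not None and a1 is None and a2 is None and a3 is None:
--         if any(a != amphipod for a in (a0,)):
--             return None
--         steps_to_enter_room = 3
--         next_room = (a0, amphipod, None, None)
--     elif a0 is not None and a1 is not None and a2 is None and a3 is None:
--         if any(a != amphipod for a in (a0, a1)):
--             return None
--         steps_to_enter_room = 2
--         next_room = (a0, a1, amphipod, None)
--     elif a0 is not None and a1 is not None and a2 is not None and a3 is None:
--         if any(a != amphipod for a in (a0, a1, a2)):
--             return None
--         steps_to_enter_room = 1
--         next_room = (a0, a1, a2, amphipod)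
--     else:
--         return None
--
--     return steps_to_enter_room, next_room
-- ===== SOURCE B (Python) =====
-- def get_possible_enter_long_room_target(amphipod, room):
--     slots = list(room)
--     if None not in slots:
--         return None
--     i = slots.index(None)
--     if any(s is not None for s in slots[i + 1:]):
--         return None
--     if any(s != amphipod for s in slots[:i]):
--         return None
--     slots[i] = amphipod
--     return 4 - i, tuple(slots)
-- ===== Notes on version B (the rewrite author's own statement) =====
-- stated objective: simpler
-- what changed: Replaces A's four hand-enumerated occupancy patterns (one if/elif branch per fill level, each with its own membership check and hand-built tuple) by one generic computation: find the index i of the first empty slot, verify the suffix is empty and the prefix all equals amphipod, then return (4 - i, room with slot i filled).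
import Mathlib
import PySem

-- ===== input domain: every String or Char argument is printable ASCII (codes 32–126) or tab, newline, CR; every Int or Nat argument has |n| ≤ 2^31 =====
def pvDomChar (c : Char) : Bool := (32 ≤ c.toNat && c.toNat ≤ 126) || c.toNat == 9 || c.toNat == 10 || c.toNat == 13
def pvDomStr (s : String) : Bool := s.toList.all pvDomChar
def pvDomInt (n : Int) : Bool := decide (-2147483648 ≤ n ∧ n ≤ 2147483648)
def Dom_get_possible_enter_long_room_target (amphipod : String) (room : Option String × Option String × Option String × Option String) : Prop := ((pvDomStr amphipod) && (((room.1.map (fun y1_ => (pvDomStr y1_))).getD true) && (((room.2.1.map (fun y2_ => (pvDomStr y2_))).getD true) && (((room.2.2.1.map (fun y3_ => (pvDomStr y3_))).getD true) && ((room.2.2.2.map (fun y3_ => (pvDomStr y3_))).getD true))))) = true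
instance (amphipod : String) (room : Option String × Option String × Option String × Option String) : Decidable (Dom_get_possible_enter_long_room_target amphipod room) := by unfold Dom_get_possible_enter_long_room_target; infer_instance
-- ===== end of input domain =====

-- B finds the first-empty-slot index once and derives steps/next_room from it, replacing A's four hand-written branch cases: simpler.


-- ===== PORT A =====
def get_possible_enter_long_room_target (amphipod : String) (room : Option String × Option String × Option String × Option String) : Option (Int × (Option String × Option String × Option String × Option String)) :=
  let a0 := room.1; let a1 := room.2.1; let a2 := room.2.2.1; let a3 := room.2.2.2
  if a0 = none ∧ a1 = none ∧ a2 = none ∧ a3 = none then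
    some (4, (some amphipod, none, none, none))
  else if a0 ≠ none ∧ a1 = none ∧ a2 = none ∧ a3 = none then
    if [a0].any (fun a => a != some amphipod) then none
    else some (3, (a0, some amphipod, none, none))
  else if a0 ≠ none ∧ a1 ≠ none ∧ a2 = none ∧ a3 = none then
    if [a0, a1].any (fun a => a != some amphipod) then none
    else some (2, (a0, a1, some amphipod, none))
  else if a0 ≠ none ∧ a1 ≠ none ∧ a2 ≠ none ∧ a3 = none then
    if [a0, a1, a2].any (fun a => a != some amphipod) then none
    else some (1, (a0, a1, a2, some amphipod))
  else none

-- ===== PORT B =====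
-- B: find the first empty slot, check the suffix is empty and the prefix is all `amphipod`,
-- then place the amphipod there.  The Python 'None not in slots / slots.index(None)' pair is
-- ported as one match on PySem.List.index? (none ⟺ the membership test fails).
def get_possible_enter_long_room_target_alt (amphipod : String) (room : Option String × Option String × Option String × Option String) : Option (Int × (Option String × Option String × Option String × Option String)) :=
  let slots : List (Option String) := [room.1, room.2.1, room.2.2.1, room.2.2.2]
  match PySem.List.index? slots none with
  | none => none
  | some i =>
    if (PySem.List.slice slots (some ((i : Int) + 1)) none).any (fun s => s != none) then none
    else if (PySem.List.slice slots none (some (i : Int))).any (fun s => s != some amphipod) then none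
    else
      let slots' := slots.set i (some amphipod)
      some (4 - (i : Int), (slots'.getD 0 none, slots'.getD 1 none, slots'.getD 2 none, slots'.getD 3 none))

-- ===== PRECONDITION & SPEC =====
def Spec_get_possible_enter_long_room_target (amphipod : String) (room : Option String × Option String × Option String × Option String) (out : Option (Int × (Option String × Option String × Option String × Option String))) : Prop := out = get_possible_enter_long_room_target_alt amphipod room
instance (amphipod : String) (room : Option String × Option String × Option String × Option String) (out : Option (Int × (Option String × Option String × Option String × Option String))) : Decidable (Spec_get_possible_enter_long_room_target amphipod room out) := by unfold Spec_get_possible_enter_long_room_target; infer_instance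

-- ===== CLAIM (what is proved, stated in full; the proofs are below) =====
def Claim_equal_get_possible_enter_long_room_target : Prop := ∀ (amphipod : String) (room : Option String × Option String × Option String × Option String), Dom_get_possible_enter_long_room_target amphipod room → Spec_get_possible_enter_long_room_target amphipod room (get_possible_enter_long_room_target amphipod room)

-- ===== LEMMAS AND PROOFS =====

-- ===== VERDICT (by name: the statement is the Claim_ definition above) =====
theorem get_possible_enter_long_room_target_spec : Claim_equal_get_possible_enter_long_room_target := by
  intro amphipod room _
  unfold Spec_get_possible_enter_long_room_target
  obtain ⟨a0, a1, a2, a3⟩ := room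
  cases a0 <;> cases a1 <;> cases a2 <;> cases a3 <;>
    (simp only [get_possible_enter_long_room_target, get_possible_enter_long_room_target_alt,
        PySem.List.index?, List.idxOf?, List.findIdx?, List.findIdx?.go,
        PySem.List.slice, PySem.List.clampIdx]
     norm_num
     try (split_ifs <;> simp_all)
    )
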